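-- pv_equiv track=rewrite | github.com/Rfattaha/Sunday-Algorithm | sundayAlg.py | check
-- ===== SOURCE A (Python) =====
-- def check(char, pat,lenpat,textindex):
--     j = lenpat - 1
--     a = -1
--     while j >= 0:
--         if pat[j] == char:
--             a = textindex - j
--             break
--         j -=1
--     return a
-- ===== SOURCE B (Python) =====
-- def check(char, pat, lenpat, textindex):
--     a = -1
--     for j in range(lenpat):
--         if pat[j] == char:
--             a = textindex - j
--     return a
-- ===== Notes on version B (the rewrite author's own statement) =====
-- stated objective: alternative
-- what changed: Replaces A's backward while-loop with early break by a forward for-loop over range(lenpat) that keeps the last (rightmost) match and never breaks.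
import Mathlib
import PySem

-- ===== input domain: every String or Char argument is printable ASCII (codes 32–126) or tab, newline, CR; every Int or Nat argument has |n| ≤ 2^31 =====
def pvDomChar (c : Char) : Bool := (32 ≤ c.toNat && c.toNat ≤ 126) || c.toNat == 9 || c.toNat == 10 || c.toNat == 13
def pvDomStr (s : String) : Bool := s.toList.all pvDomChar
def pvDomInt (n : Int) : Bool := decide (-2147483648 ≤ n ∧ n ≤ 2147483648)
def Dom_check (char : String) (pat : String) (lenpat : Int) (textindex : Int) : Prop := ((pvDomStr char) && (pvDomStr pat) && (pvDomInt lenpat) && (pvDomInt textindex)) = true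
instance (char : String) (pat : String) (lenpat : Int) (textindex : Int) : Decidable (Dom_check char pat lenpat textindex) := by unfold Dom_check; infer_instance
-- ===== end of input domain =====

-- B replaces A's backward while-loop with early break by a forward fold keeping the last match (alternative decomposition, same cost).

-- ===== PORT A =====
-- A's `while j >= 0` loop counting j down from lenpat-1 with a break on the first
-- (rightmost) match; k+1 iterations remain when j = k.  `pat[j] == char` is ported
-- as the option comparison below (an out-of-range index, excluded by Pre_, yields
-- none and is treated as a non-match).
def checkLoopA (char : String) (pat : String) (textindex : Int) : Nat → Int
  | 0 => -1
  | k+1 =>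
      if (PySem.Str.pyGet? pat (k : Int)).map (fun c => [c]) = some char.toList then
        textindex - (k : Int)
      else checkLoopA char pat textindex k

def check (char : String) (pat : String) (lenpat : Int) (textindex : Int) : Int :=
  checkLoopA char pat textindex lenpat.toNat

-- ===== PORT B =====
-- B: `for j in range(lenpat)` keeping the last match in the accumulator.
def check_alt (char : String) (pat : String) (lenpat : Int) (textindex : Int) : Int :=
  (PySem.List.pyRange 0 lenpat 1).foldl
    (fun a j =>
      if (PySem.Str.pyGet? pat j).map (fun c => [c]) = some char.toList then
        textindex - j
      else a)
    (-1)

-- ===== PRECONDITION & SPEC =====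
-- Pre_ excludes exactly the inputs where Python A raises IndexError: lenpat > len(pat)
-- (A's first access pat[lenpat-1] is out of range there).
def Pre_check (char : String) (pat : String) (lenpat : Int) (textindex : Int) : Prop :=
  lenpat ≤ (pat.length : Int)
instance (char : String) (pat : String) (lenpat : Int) (textindex : Int) : Decidable (Pre_check char pat lenpat textindex) := by unfold Pre_check; infer_instance
def pvWitness_check : String × String × Int × Int := ("a", "ba", 2, 5)
def Spec_check (char : String) (pat : String) (lenpat : Int) (textindex : Int) (out : Int) : Prop := out = check_alt char pat lenpat textindex
instance (char : String) (pat : String) (lenpat : Int) (textindex : Int) (out : Int) : Decidable (Spec_check char pat lenpat textindex out) := by unfold Spec_check; infer_instance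

-- ===== CLAIM (what is proved, stated in full; the proofs are below) =====
def Claim_equal_check : Prop := ∀ (char : String) (pat : String) (lenpat : Int) (textindex : Int), Dom_check char pat lenpat textindex → Pre_check char pat lenpat textindex → Spec_check char pat lenpat textindex (check char pat lenpat textindex)

-- ===== LEMMAS AND PROOFS =====

-- The forward fold over range(0, n) equals A's countdown loop with n iterations:
-- the last fold step looks at index n-1 exactly where the countdown loop starts.
theorem foldl_eq_checkLoopA (char pat : String) (textindex : Int) (n : Nat) :
    (PySem.List.pyRange 0 (n : Int) 1).foldl
      (fun a j =>
        if (PySem.Str.pyGet? pat j).map (fun c => [c]) = some char.toList then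
          textindex - j
        else a)
      (-1) = checkLoopA char pat textindex n := by
  induction n with
  | zero =>
      simp only [Nat.cast_zero]
      rw [PySem.List.pyRange_one_eq_nil le_rfl]
      rfl
  | succ k ih =>
      rw [show (((k + 1 : Nat)) : Int) = (k : Int) + 1 by push_cast; ring,
        PySem.List.pyRange_one_succ_right (show (0:Int) ≤ (k:Int) by omega),
        List.foldl_append, ih, List.foldl_cons, List.foldl_nil]
      rfl

theorem check_spec : Claim_equal_check := by
  intro char pat lenpat textindex _ _
  unfold Spec_check check check_alt
  rcases le_or_gt lenpat 0 with h | h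
  · rw [PySem.List.pyRange_one_eq_nil (by omega)]
    have : lenpat.toNat = 0 := by omega
    simp [this, checkLoopA]
  · have : lenpat = ((lenpat.toNat : Nat) : Int) := by omega
    rw [this, foldl_eq_checkLoopA, Int.toNat_natCast]
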